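-- pv_equiv track=rewrite | github.com/jadenl99/JPCP-tool | data_pipeline/pre_cvat/parser.py | get_im_id
-- ===== SOURCE A (Python) =====
-- def get_im_id(s):
--
--     # From util file; retrieves image by ID
--     s = s[::-1]
--     start_index = -1
--     end_index = -1
--     for i, c in enumerate(s):
--         if c.isdigit():
--             end_index = i + 1
--             if start_index == -1:
--                 start_index = i
--         elif start_index > -1:
--             break
--     if start_index == -1:
--         return None
--
--     return (s[start_index:end_index][::-1])
-- ===== SOURCE B (Python) =====
-- def get_im_id(s):
--     # Single forward pass: keep the current digit run and the last completed one.
--     last = ""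
--     cur = ""
--     for c in s:
--         if c.isdigit():
--             cur += c
--         else:
--             if cur:
--                 last = cur
--             cur = ""
--     if cur:
--         last = cur
--     return last or None
-- ===== Notes on version B (the rewrite author's own statement) =====
-- stated objective: simpler
-- what changed: Replaces the reversed early-exit index scan plus double slicing/reversing with a single forward pass that accumulates the current digit run and remembers the last completed one.
import Mathlib
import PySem

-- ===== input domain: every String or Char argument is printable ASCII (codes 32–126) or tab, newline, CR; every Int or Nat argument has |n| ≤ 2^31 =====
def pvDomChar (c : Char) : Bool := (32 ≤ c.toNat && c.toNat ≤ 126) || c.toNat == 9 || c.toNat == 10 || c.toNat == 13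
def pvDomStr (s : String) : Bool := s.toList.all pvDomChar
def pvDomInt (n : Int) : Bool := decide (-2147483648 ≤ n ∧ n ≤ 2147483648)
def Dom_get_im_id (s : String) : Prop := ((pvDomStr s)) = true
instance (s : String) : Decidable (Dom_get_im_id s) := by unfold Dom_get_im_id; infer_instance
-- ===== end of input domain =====

-- B replaces A's reversed early-exit index scan (plus double slicing/reversing) by one forward
-- pass keeping the current digit run and the last completed one: simpler, same O(n) cost.

-- ===== PORT A =====
-- the for-loop of A over the reversed string: state (i, start_index, end_index)
def aLoop : List Char → Int → Int → Int → Int × Int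
  | [], _, st, en => (st, en)
  | c :: rest, i, st, en =>
    if PySem.Chars.isdigit c then
      -- end_index = i + 1; if start_index == -1: start_index = i
      aLoop rest (i + 1) (if st == -1 then i else st) (i + 1)
    else if st > -1 then (st, en)   -- break
    else aLoop rest (i + 1) st en

def get_im_id (s : String) : Option String :=
  let r := s.toList.reverse   -- s = s[::-1]  (slice with step -1 is reversal, PySem.List.slice?_none_none_neg_one)
  let p := aLoop r 0 (-1) (-1)
  if p.1 == -1 then none
  else some (String.ofList ((PySem.List.slice r (some p.1) (some p.2)).reverse))

-- ===== PORT B =====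
-- one iteration of B's forward loop: state (last, cur)
def bStep (st : List Char × List Char) (c : Char) : List Char × List Char :=
  if PySem.Chars.isdigit c then (st.1, st.2 ++ [c])
  else if st.2 ≠ [] then (st.2, [])
  else (st.1, [])

def get_im_id_alt (s : String) : Option String :=
  let p := s.toList.foldl bStep ([], [])
  let last := if p.2 ≠ [] then p.2 else p.1
  if last = [] then none else some (String.ofList last)

-- ===== PRECONDITION & SPEC =====
def Spec_get_im_id (s : String) (out : Option String) : Prop := out = get_im_id_alt s
instance (s : String) (out : Option String) : Decidable (Spec_get_im_id s out) := by unfold Spec_get_im_id; infer_instance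

-- ===== CLAIM (what is proved, stated in full; the proofs are below) =====
def Claim_equal_get_im_id : Prop := ∀ (s : String), Dom_get_im_id s → Spec_get_im_id s (get_im_id s)

-- ===== LEMMAS AND PROOFS =====

-- the last maximal digit run of l, as a list (empty if l has no digit)
def lastRun (l : List Char) : List Char :=
  ((l.reverse.dropWhile (fun c => !PySem.Chars.isdigit c)).takeWhile PySem.Chars.isdigit).reverse

lemma take_length_takeWhile {α : Type} (q : α → Bool) (l : List α) :
    l.take (l.takeWhile q).length = l.takeWhile q := by
  induction l with
  | nil => simp
  | cons c rest ih =>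
    by_cases h : q c = true <;> simp [List.takeWhile_cons, h, ih]

lemma drop_length_takeWhile {α : Type} (q : α → Bool) (l : List α) :
    l.drop (l.takeWhile q).length = l.dropWhile q := by
  induction l with
  | nil => simp
  | cons c rest ih =>
    by_cases h : q c = true <;> simp [List.takeWhile_cons, List.dropWhile_cons, h, ih]

lemma aLoop_inRun (r : List Char) : ∀ (i st en : Int), st > -1 →
    aLoop r i st en =
      (st, if (r.takeWhile PySem.Chars.isdigit).length = 0 then en
           else i + (r.takeWhile PySem.Chars.isdigit).length) := by
  induction r with
  | nil => intro i st en _; simp [aLoop]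
  | cons c rest ih =>
    intro i st en hst
    by_cases h : PySem.Chars.isdigit c = true
    · have hne : (st == -1) = false := by simp; omega
      rw [aLoop]
      simp only [h, if_pos rfl, hne, if_true]
      rw [if_neg (by simp), ih (i + 1) st (i + 1) hst]
      simp only [List.takeWhile_cons, h, if_pos rfl]
      by_cases ht : (rest.takeWhile PySem.Chars.isdigit).length = 0 <;>
        simp [ht, List.length_cons, Prod.ext_iff] <;> omega
    · rw [aLoop]
      simp [h, hst, List.takeWhile_cons]

lemma aLoop_pre (r : List Char) : ∀ (i : Int), 0 ≤ i →
    aLoop r i (-1) (-1) =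
      (if ((r.dropWhile (fun c => !PySem.Chars.isdigit c)).takeWhile PySem.Chars.isdigit).length = 0
       then (-1, -1)
       else (i + (r.takeWhile (fun c => !PySem.Chars.isdigit c)).length,
             i + (r.takeWhile (fun c => !PySem.Chars.isdigit c)).length
               + ((r.dropWhile (fun c => !PySem.Chars.isdigit c)).takeWhile PySem.Chars.isdigit).length)) := by
  induction r with
  | nil => intro i _; simp [aLoop]
  | cons c rest ih =>
    intro i hi
    by_cases h : PySem.Chars.isdigit c = true
    · rw [aLoop]
      simp only [h, if_pos rfl]
      rw [show (if ((-1 : Int) == -1) = true then i else (-1 : Int)) = i by simp,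
        aLoop_inRun rest (i + 1) i (i + 1) (by omega)]
      simp only [List.dropWhile_cons, List.takeWhile_cons, h, Bool.not_true,
        Bool.false_eq_true, if_neg, if_pos rfl, reduceIte]
      by_cases ht : (rest.takeWhile PySem.Chars.isdigit).length = 0 <;>
        simp [ht, List.length_cons, Prod.ext_iff] <;> omega
    · rw [aLoop]
      simp only [h, Bool.false_eq_true, if_neg, reduceIte]
      rw [if_neg (by omega), ih (i + 1) (by omega)]
      simp only [List.dropWhile_cons, List.takeWhile_cons, h, Bool.not_false,
        Bool.false_eq_true, if_pos rfl, reduceIte]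
      by_cases ht : ((rest.dropWhile (fun c => !PySem.Chars.isdigit c)).takeWhile
          PySem.Chars.isdigit).length = 0 <;> simp [ht, List.length_cons, Prod.ext_iff] <;> omega

-- A computes: none if the reversed string has no digit run, else that first run, reversed back
lemma get_im_id_eq (s : String) :
    get_im_id s = if lastRun s.toList = [] then none
                  else some (String.ofList (lastRun s.toList)) := by
  have hred : get_im_id s =
      (if (aLoop s.toList.reverse 0 (-1) (-1)).1 == -1 then none
       else some (String.ofList ((PySem.List.slice s.toList.reverse
         (some (aLoop s.toList.reverse 0 (-1) (-1)).1)
         (some (aLoop s.toList.reverse 0 (-1) (-1)).2)).reverse))) := rfl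
  rw [hred]; unfold lastRun
  set r := s.toList.reverse with hr
  set p := (r.takeWhile (fun c => !PySem.Chars.isdigit c)).length with hp
  set t := ((r.dropWhile (fun c => !PySem.Chars.isdigit c)).takeWhile PySem.Chars.isdigit).length with htdef
  rw [aLoop_pre r 0 le_rfl]
  by_cases ht : t = 0
  · simp [ht, ← htdef, List.eq_nil_iff_length_eq_zero]
  · rw [if_neg ht]
    simp only [zero_add]
    rw [if_neg (by simp)]
    rw [PySem.List.slice_natCast_add r p t]
    rw [show r.drop p = r.dropWhile (fun c => !PySem.Chars.isdigit c) from
      drop_length_takeWhile _ r]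
    rw [show (r.dropWhile (fun c => !PySem.Chars.isdigit c)).take t =
        (r.dropWhile (fun c => !PySem.Chars.isdigit c)).takeWhile PySem.Chars.isdigit from
      take_length_takeWhile _ _]
    rw [if_neg (by simp [List.eq_nil_iff_length_eq_zero, ← htdef, ht])]

-- B's fold: cur is the trailing digit run, and (cur or last) is the last digit run
lemma bfold_char (l : List Char) :
    (l.foldl bStep ([], [])).2 = (l.reverse.takeWhile PySem.Chars.isdigit).reverse ∧
    (if (l.foldl bStep ([], [])).2 ≠ [] then (l.foldl bStep ([], [])).2
     else (l.foldl bStep ([], [])).1) = lastRun l := by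
  induction l using List.reverseRecOn with
  | nil => simp [lastRun]
  | append_singleton l c ih =>
    obtain ⟨ih2, ih1⟩ := ih
    rw [List.foldl_append, List.foldl_cons, List.foldl_nil]
    by_cases h : PySem.Chars.isdigit c = true
    · constructor
      · simp [bStep, h, List.takeWhile_cons, ih2]
      · simp only [bStep, h, if_pos rfl]
        rw [if_pos (by simp)]
        unfold lastRun
        simp [List.dropWhile_cons, List.takeWhile_cons, h, ih2]
    · have h2 : ∀ st : List Char × List Char, (bStep st c).2 = [] := by
        intro st; simp only [bStep, h, Bool.false_eq_true, reduceIte]; split <;> rfl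
      constructor
      · simp [h2, h]
      · simp only [bStep, h, Bool.false_eq_true, reduceIte]
        have hlr : lastRun (l ++ [c]) = lastRun l := by
          unfold lastRun
          simp [List.dropWhile_cons, h]
        rw [hlr, ← ih1]
        by_cases hc : (l.foldl bStep ([], [])).2 = [] <;> simp [hc]

lemma get_im_id_alt_eq (s : String) :
    get_im_id_alt s = if lastRun s.toList = [] then none
                      else some (String.ofList (lastRun s.toList)) := by
  unfold get_im_id_alt
  obtain ⟨_, h⟩ := bfold_char s.toList
  simp only [h]

-- ===== VERDICT (by name: the statement is the Claim_ definition above) =====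
theorem get_im_id_spec : Claim_equal_get_im_id := by
  intro s _
  unfold Spec_get_im_id
  rw [get_im_id_eq, get_im_id_alt_eq]
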